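-- pv_equiv track=rewrite | github.com/NikLaz25/Training_1 | task_25.py | TransformTransform
-- ===== SOURCE A (Python) =====
-- def TransformTransform(A, N):
--     '''алгоритм поиска ключевого ключа'''
--     def Transform(A):
--         '''трансформация'''
--         B = []
--         for i in range(len(A) - 1):
--             for j in range(len(A) - 1):
--
--                 k = i + j
--                 try:
--                     B += [max(A[j : k])]
--
--                 except:
--                     pass
--         return B
--
--     B = Transform(Transform(A))
--
--     if sum(B) % 2 == 0:
--         return True
--     else:
--         return False
-- ===== SOURCE B (Python) =====
-- def TransformTransform(A, N):
--     '''Same result, but each transform keeps a running window-maximum per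
--     start index instead of recomputing every slice max: O(n^2) per
--     transform instead of O(n^3).'''
--     def _transform(A):
--         n = len(A)
--         cur = A[:n - 1]          # window-length-1 maxima for each start j
--         rows = []
--         for i in range(1, n - 1):
--             rows.append(cur)
--             cur = [max(c, A[j + i]) if j + i < n else c
--                    for j, c in enumerate(cur)]
--         return [x for row in rows for x in row]
--
--     return sum(_transform(_transform(A))) % 2 == 0
-- ===== Notes on version B (the rewrite author's own statement) =====
-- stated objective: faster
-- what changed: Each transform keeps one running window-maximum per start index and extends it by one element per outer step, instead of recomputing max(A[j:k]) from scratch for every (i, j) pair inside nested loops with try/except; intended as faster (O(n^2) vs O(n^3) per transform) and measured 17.7x at n=16 in a timing run, though at n=64 both implementations exceeded that run's time limit.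
import Mathlib
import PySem

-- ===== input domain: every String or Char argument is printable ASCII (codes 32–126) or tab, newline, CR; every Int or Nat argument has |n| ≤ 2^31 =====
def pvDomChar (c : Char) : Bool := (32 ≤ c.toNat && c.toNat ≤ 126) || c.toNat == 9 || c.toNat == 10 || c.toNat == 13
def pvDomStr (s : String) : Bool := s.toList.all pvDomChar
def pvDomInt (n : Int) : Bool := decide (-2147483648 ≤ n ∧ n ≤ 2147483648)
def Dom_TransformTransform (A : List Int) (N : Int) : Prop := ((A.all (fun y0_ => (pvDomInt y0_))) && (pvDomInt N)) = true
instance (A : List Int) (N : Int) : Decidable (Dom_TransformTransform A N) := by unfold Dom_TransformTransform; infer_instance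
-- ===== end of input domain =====

-- B replaces the recomputation of every slice maximum by a running
-- window-maximum per start index; same return value.

-- ===== PORT A =====
-- inner helper Transform of A: nested loops, slice max per (i, j); the
-- try/except skips exactly the empty slices (max([]) is the only exception)
def pyTransformA (A : List Int) : List Int :=
  -- B = [] … B += [max(A[j:k])]: the Python list accumulator is an Array, append = push
  ((PySem.List.pyRange 0 ((A.length : Int) - 1) 1).foldl (fun (B : Array Int) i =>
    (PySem.List.pyRange 0 ((A.length : Int) - 1) 1).foldl (fun B j =>
      let k := i + j
      match PySem.List.max? (PySem.List.slice A (some j) (some k)) (fun y => y) with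
      | some m => B.push m
      | none => B) B) #[]).toList

def TransformTransform (A : List Int) (N : Int) : Bool :=
  let B := pyTransformA (pyTransformA A)
  if PySem.Int.mod B.sum 2 = 0 then true else false

-- ===== PORT B =====
-- one comprehension step of Source B: extend every window maximum by one element
def altStep (A : List Int) (i : Int) (cur : List Int) : List Int :=
  (PySem.List.enumerate cur 0).map (fun jc =>
    if jc.1 + i < (A.length : Int) then max jc.2 (PySem.List.pyGetD A (jc.1 + i) 0) else jc.2)

-- _transform of Source B: rows of running window maxima, flattened at the end
def pyTransformB (A : List Int) : List Int :=
  let n : Int := A.length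
  let p := (PySem.List.pyRange 1 (n - 1) 1).foldl
      (fun (p : List (List Int) × List Int) i => (p.1 ++ [p.2], altStep A i p.2))
      ([], PySem.List.slice A none (some (n - 1)))
  p.1.flatMap id

def TransformTransform_alt (A : List Int) (N : Int) : Bool :=
  decide (PySem.Int.mod (pyTransformB (pyTransformB A)).sum 2 = 0)

-- ===== PRECONDITION & SPEC =====
def Spec_TransformTransform (A : List Int) (N : Int) (out : Bool) : Prop := out = TransformTransform_alt A N
instance (A : List Int) (N : Int) (out : Bool) : Decidable (Spec_TransformTransform A N out) := by unfold Spec_TransformTransform; infer_instance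

-- ===== CLAIM (what is proved, stated in full; the proofs are below) =====
def Claim_equal_TransformTransform : Prop := ∀ (A : List Int) (N : Int), Dom_TransformTransform A N → Spec_TransformTransform A N (TransformTransform A N)

-- ===== LEMMAS AND PROOFS =====

-- the window A[j : j+i] and its maximum (0 is never used: only taken on nonempty windows)
def win (A : List Int) (j i : Nat) : List Int := (A.drop j).take i

def wmax (A : List Int) (j i : Nat) : Int :=
  match win A j i with
  | [] => 0
  | x :: t => t.foldl max x

def rowS (A : List Int) (i : Nat) : List Int :=
  (List.range (A.length - 1)).map (fun j => wmax A j i)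

def tSpec (A : List Int) : List Int :=
  (List.range (A.length - 1 - 1)).flatMap (fun i => rowS A (i + 1))

theorem win_nonempty (A : List Int) (j i : Nat) (hj : j < A.length) (hi : 1 ≤ i) :
    win A j i ≠ [] := by
  unfold win
  intro h
  have := congrArg List.length h
  simp [List.length_take, List.length_drop] at this
  omega

theorem wmax_one (A : List Int) (j : Nat) (hj : j < A.length) :
    wmax A j 1 = A.getD j 0 := by
  unfold wmax win
  rw [show (1 : Nat) = 0 + 1 from rfl, List.take_add_one]
  have h0 : (A.drop j)[0]? = some A[j] := by
    rw [List.getElem?_drop]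
    simp
  simp only [h0, List.take_zero, Option.toList_some, List.nil_append, List.foldl_nil]
  simp [List.getD, List.getElem?_eq_getElem hj]

theorem wmax_succ (A : List Int) (j i : Nat) (hj : j < A.length) (hi : 1 ≤ i) :
    wmax A j (i + 1) =
      if j + i < A.length then max (wmax A j i) (A.getD (j + i) 0) else wmax A j i := by
  by_cases h : j + i < A.length
  · have hget : (A.drop j)[i]? = some A[j + i] := by
      rw [List.getElem?_drop]
      exact List.getElem?_eq_getElem h
    have hwin : win A j (i + 1) = win A j i ++ [A[j + i]] := by
      unfold win
      rw [List.take_add_one, hget]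
      rfl
    have hd : A.getD (j + i) 0 = A[j + i] := by
      simp [List.getD, List.getElem?_eq_getElem h]
    rcases hx : win A j i with _ | ⟨x, t⟩
    · exact absurd hx (win_nonempty A j i hj hi)
    · rw [if_pos h, hd]
      unfold wmax
      rw [hwin, hx]
      simp [List.foldl_append]
  · have hwin : win A j (i + 1) = win A j i := by
      unfold win
      have hlen : (A.drop j).length ≤ i := by
        simp [List.length_drop]; omega
      rw [List.take_of_length_le hlen, List.take_of_length_le (by omega)]
    unfold wmax
    rw [hwin, if_neg h]

-- ---------- A side ----------

def gA (A : List Int) (i : Int) (j : Nat) : List Int :=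
  (PySem.List.max? (PySem.List.slice A (some (j : Int)) (some (i + (j : Int)))) (fun y => y)).toList

theorem foldl_match {a : Type} (l : List a) (f : a -> Option Int) (B : Array Int) :
    (l.foldl (fun B j => match f j with | some m => B.push m | none => B) B).toList
    = B.toList ++ l.flatMap (fun j => (f j).toList) := by
  induction l generalizing B with
  | nil => simp
  | cons x t ih =>
    cases h : f x <;> simp [h, ih]

theorem foldl_toList {a : Type} (l : List a) (step : Array Int -> a -> Array Int)
    (F : a -> List Int) (h : forall B x, (step B x).toList = B.toList ++ F x) (B : Array Int) :
    (l.foldl step B).toList = B.toList ++ l.flatMap F := by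
  induction l generalizing B with
  | nil => simp
  | cons x t ih => simp [ih, h, List.flatMap_cons]

theorem gA_def (A : List Int) (i : Int) (j : Nat) :
    (PySem.List.max? (PySem.List.slice A (some (j : Int)) (some (i + (j : Int)))) (fun y => y)).toList
    = gA A i j := rfl

theorem flatMap_congr' {a b : Type} (l : List a) (f g : a -> List b) (h : forall x, x ∈ l -> f x = g x) :
    l.flatMap f = l.flatMap g := by
  induction l with
  | nil => rfl
  | cons x t ih =>
    simp only [List.flatMap_cons]
    rw [h x (by simp), ih (fun y hy => h y (by simp [hy]))]

theorem flatten_map_singleton {a b : Type} (l : List a) (f : a -> b) :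
    (l.map (fun x => [f x])).flatten = l.map f := by
  induction l with
  | nil => rfl
  | cons x t ih => simp [ih]

theorem gA_zero (A : List Int) (j : Nat) : gA A 0 j = [] := by
  unfold gA
  have hs : PySem.List.slice A (some (j : Int)) (some ((0 : Int) + (j : Int))) = [] := by
    rw [zero_add, PySem.List.slice_natCast]
    simp
  rw [hs]
  simp [PySem.List.max?_eq_none_iff]

theorem gA_pos (A : List Int) (i j : Nat) (hj : j < A.length) (hi : 1 ≤ i) :
    gA A (i : Int) j = [wmax A j i] := by
  unfold gA
  have hs : PySem.List.slice A (some (j : Int)) (some ((i : Int) + (j : Int))) = win A j i := by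
    rw [add_comm, PySem.List.slice_natCast_add]; rfl
  rcases hx : win A j i with _ | ⟨x, t⟩
  · exact absurd hx (win_nonempty A j i hj hi)
  · rw [hs, hx, PySem.List.max?_id_cons]
    unfold wmax
    rw [hx]
    rfl

theorem row_of_flatMap (A : List Int) (m' : Nat) (hm : A.length - 1 = m' + 1)
    (i : Nat) (hi : 1 ≤ i) :
    (List.range (m' + 1)).flatMap (fun j => gA A (i : Int) j) = rowS A i := by
  unfold rowS
  rw [hm, List.flatMap_def]
  have hcong : (List.range (m' + 1)).map (fun j => gA A (i : Int) j)
      = (List.range (m' + 1)).map (fun j => [wmax A j i]) := by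
    apply List.map_congr_left
    intro j hj
    have hj' : j < m' + 1 := List.mem_range.mp hj
    exact gA_pos A i j (by omega) hi
  rw [hcong, flatten_map_singleton]

theorem outer_split {a : Type} (m' : Nat) (F : Nat -> List a) :
    (List.range (m' + 1)).flatMap F = F 0 ++ (List.range m').flatMap (fun i => F (i + 1)) := by
  rw [List.range_succ_eq_map]
  simp [List.flatMap_cons, List.flatMap_map, Nat.succ_eq_add_one]

theorem pyTransformA_eq (A : List Int) : pyTransformA A = tSpec A := by
  have hrange : PySem.List.pyRange 0 ((A.length : Int) - 1) 1
      = (List.range (A.length - 1)).map (fun k : Nat => (k : Int)) := by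
    rw [PySem.List.pyRange_one]
    rw [show (((A.length : Int) - 1 - 0)).toNat = A.length - 1 by omega]
    simp
  have step1 : pyTransformA A
      = (PySem.List.pyRange 0 ((A.length : Int) - 1) 1).flatMap
          (fun i => (PySem.List.pyRange 0 ((A.length : Int) - 1) 1).flatMap
            (fun j => (PySem.List.max? (PySem.List.slice A (some j) (some (i + j))) (fun y => y)).toList)) := by
    unfold pyTransformA
    rw [foldl_toList _ _
      (fun i => (PySem.List.pyRange 0 ((A.length : Int) - 1) 1).flatMap
        (fun j => (PySem.List.max? (PySem.List.slice A (some j) (some (i + j))) (fun y => y)).toList))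
      (fun B i => foldl_match _
        (fun j => PySem.List.max? (PySem.List.slice A (some j) (some (i + j))) (fun y => y)) B) #[]]
    simp
  rw [step1]
  simp only [hrange, List.flatMap_map]
  simp only [gA_def]
  unfold tSpec
  cases hm : A.length - 1 with
  | zero => simp
  | succ m' =>
    rw [Nat.add_sub_cancel, outer_split]
    have h0 : (List.range (m' + 1)).flatMap (fun j => gA A (((0 : Nat)) : Int) j) = [] := by
      have h' : forall j, j ∈ List.range (m' + 1) -> gA A (((0 : Nat)) : Int) j = ([] : List Int) := by
        intro j _
        rw [show (((0 : Nat)) : Int) = (0 : Int) by simp]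
        exact gA_zero A j
      rw [flatMap_congr' _ _ _ h']
      simp
    rw [h0, List.nil_append]
    apply flatMap_congr'
    intro x _
    exact row_of_flatMap A m' hm (x + 1) (by omega)

-- ---------- B side ----------

theorem altStep_row (A : List Int) (i : Nat) (hi : 1 ≤ i) :
    altStep A (i : Int) (rowS A i) = rowS A (i + 1) := by
  unfold altStep rowS
  apply List.ext_getElem
  · simp [PySem.List.length_enumerate]
  · intro j h1 h2
    have hj : j < A.length - 1 := by
      simpa [PySem.List.length_enumerate] using h1
    have hjn : j < A.length := by omega
    simp only [List.getElem_map, PySem.List.getElem_enumerate, List.getElem_range, zero_add]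
    have hcast : ((j : Int) + (i : Int)) = (((j + i : Nat)) : Int) := by push_cast; ring
    rw [hcast, PySem.List.pyGetD_natCast]
    have hcond : ((((j + i : Nat)) : Int) < ((A.length : Nat) : Int)) ↔ j + i < A.length := by
      exact_mod_cast Iff.rfl
    rw [wmax_succ A j i hjn hi]
    by_cases h : j + i < A.length
    · rw [if_pos (hcond.mpr h), if_pos h]
    · rw [if_neg (fun hc => h (hcond.mp hc)), if_neg h]

theorem init_row (A : List Int) :
    PySem.List.slice A none (some ((A.length : Int) - 1)) = rowS A 1 := by
  cases A with
  | nil =>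
    have : ((([] : List Int).length : Int) - 1) = (-1 : Int) := by simp
    rw [this, PySem.List.slice_to_neg_one]
    simp [rowS]
  | cons a t =>
    have h : (((a :: t).length : Int) - 1) = ((t.length : Nat) : Int) := by
      simp
    rw [h, PySem.List.slice_to_natCast]
    apply List.ext_getElem
    · simp [rowS]
    · intro j h1 h2
      have hj : j < t.length := by simpa using h1
      have hjn : j < (a :: t).length := by simp; omega
      simp only [rowS, List.getElem_map, List.getElem_range, List.getElem_take]
      rw [wmax_one (a :: t) j hjn]
      simp [List.getD, List.getElem?_eq_getElem hjn]

theorem foldB (A : List Int) (k : Nat) :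
    ((List.range k).map (fun t : Nat => (1 : Int) + (t : Int))).foldl
      (fun (p : List (List Int) × List Int) i => (p.1 ++ [p.2], altStep A i p.2))
      ([], rowS A 1)
    = ((List.range k).map (fun i => rowS A (i + 1)), rowS A (k + 1)) := by
  induction k with
  | zero => simp
  | succ k ih =>
    rw [List.range_succ, List.map_append, List.map_append, List.foldl_append, ih]
    simp only [List.map_cons, List.map_nil, List.foldl_cons, List.foldl_nil]
    rw [show (1 : Int) + (k : Int) = (((k + 1 : Nat)) : Int) by push_cast; ring]
    rw [altStep_row A (k + 1) (by omega)]

theorem pyTransformB_eq (A : List Int) : pyTransformB A = tSpec A := by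
  have hrange : PySem.List.pyRange 1 ((A.length : Int) - 1) 1
      = (List.range (A.length - 2)).map (fun t : Nat => (1 : Int) + (t : Int)) := by
    rw [PySem.List.pyRange_one]
    rw [show (((A.length : Int) - 1 - 1)).toNat = A.length - 2 by omega]
  simp only [pyTransformB]
  rw [hrange, init_row, foldB]
  unfold tSpec
  rw [show A.length - 1 - 1 = A.length - 2 by omega]
  simp [List.flatMap_map]

-- ===== VERDICT (by name: the statement is the Claim_ definition above) =====
theorem TransformTransform_spec : Claim_equal_TransformTransform := by
  intro A N _
  unfold Spec_TransformTransform TransformTransform TransformTransform_alt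
  rw [pyTransformA_eq, pyTransformA_eq, pyTransformB_eq, pyTransformB_eq]
  by_cases h : PySem.Int.mod (tSpec (tSpec A)).sum 2 = 0
  · simp [h]
  · simp [h]
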